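-- pv_equiv track=rewrite | github.com/Ordered-Memory-RL/ompn_dial | utils.py | point_of_change
-- ===== SOURCE A (Python) =====
-- def point_of_change(onsets):
--     """ Return: an list of change points. Such that change[i] is the ending of ith segment.
--     change[-1] is the last position """
--     prev_ele = onsets[0]
--     result = []
--     for idx in range(1, len(onsets)):
--         curr_ele = onsets[idx]
--         if curr_ele != prev_ele:
--             result.append(idx - 1)
--         prev_ele = curr_ele
--     result.append(len(onsets) - 1)
--     return result
-- ===== SOURCE B (Python) =====
-- def point_of_change(onsets):
--     """ Return: an list of change points. Such that change[i] is the ending of ith segment.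
--     change[-1] is the last position """
--     n = len(onsets)
--     result = []
--     i = 0
--     while i < n:
--         j = i + 1
--         while j < n and onsets[j] == onsets[i]:
--             j += 1
--         result.append(j - 1)
--         i = j
--     return result
-- ===== Notes on version B (the rewrite author's own statement) =====
-- stated objective: alternative
-- what changed: B walks the list run by run with a two-pointer inner scan that consumes each block of equal values and records its end index, instead of A's single pass with a prev-element comparison plus an unconditional trailing append.
import Mathlib
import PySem

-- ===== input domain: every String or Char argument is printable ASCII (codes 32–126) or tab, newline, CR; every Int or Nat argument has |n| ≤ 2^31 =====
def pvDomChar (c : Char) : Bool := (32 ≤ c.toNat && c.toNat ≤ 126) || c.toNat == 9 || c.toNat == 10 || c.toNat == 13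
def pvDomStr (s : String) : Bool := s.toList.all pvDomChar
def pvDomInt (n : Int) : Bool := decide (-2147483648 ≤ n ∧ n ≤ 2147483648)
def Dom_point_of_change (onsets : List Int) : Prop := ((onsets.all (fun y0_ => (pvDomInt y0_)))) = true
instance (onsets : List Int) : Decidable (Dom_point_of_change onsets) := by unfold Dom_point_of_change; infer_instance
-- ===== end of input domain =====

-- B replaces A's prev-element single pass (with its unconditional trailing append) by a
-- two-pointer run scan that consumes each block of equal values and records its end index;
-- same cost, different decomposition.


-- ===== PORT A =====
-- prev_ele = onsets[0] raises IndexError on []; Pre_ excludes that input, pyGetD's default is never read there.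
def point_of_change (onsets : List Int) : List Int :=
  let prev_ele := PySem.List.pyGetD onsets 0 0
  let st := (PySem.List.pyRange 1 (onsets.length : Int) 1).foldl
    (fun (s : Int × List Int) idx =>
      let curr := PySem.List.pyGetD onsets idx 0
      (curr, if curr ≠ s.1 then s.2 ++ [idx - 1] else s.2))
    (prev_ele, [])
  st.2 ++ [(onsets.length : Int) - 1]

-- ===== PORT B =====
-- inner while loop: advance j while j < n and onsets[j] == v (v = onsets[i], fixed); the index is
-- always in range when read, so getD's default is never used (exact).
def pocScan (onsets : List Int) (v : Int) (j : Nat) : Nat :=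
  if h : j < onsets.length ∧ onsets.getD j 0 = v then pocScan onsets v (j + 1)
  else j
termination_by onsets.length - j
decreasing_by omega

theorem pocScan_ge (onsets : List Int) (v : Int) (j : Nat) : j ≤ pocScan onsets v j := by
  have key : ∀ (n j : Nat), onsets.length - j ≤ n → j ≤ pocScan onsets v j := by
    intro n
    induction n with
    | zero =>
      intro j hj
      rw [pocScan]
      split
      · omega
      · exact le_refl j
    | succ n ih =>
      intro j hj
      rw [pocScan]
      split
      · next h => exact le_trans (by omega) (ih (j + 1) (by omega))
      · exact le_refl j
  exact key onsets.length j (by omega)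

-- outer while loop over segment starts
def pocOuter (onsets : List Int) (i : Nat) (acc : List Int) : List Int :=
  if _h : i < onsets.length then
    let j := pocScan onsets (onsets.getD i 0) (i + 1)
    pocOuter onsets j (acc ++ [(j : Int) - 1])
  else acc
termination_by onsets.length - i
decreasing_by
  have := pocScan_ge onsets (onsets.getD i 0) (i + 1)
  omega

def point_of_change_alt (onsets : List Int) : List Int :=
  pocOuter onsets 0 []

-- ===== PRECONDITION & SPEC =====
-- Pre_ excludes only the empty list, on which A's 'onsets[0]' raises IndexError.
def Pre_point_of_change (onsets : List Int) : Prop := onsets ≠ []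
instance (onsets : List Int) : Decidable (Pre_point_of_change onsets) := by unfold Pre_point_of_change; infer_instance
def pvWitness_point_of_change : List Int := [1, 1, 2]

def Spec_point_of_change (onsets : List Int) (out : List Int) : Prop := out = point_of_change_alt onsets
instance (onsets : List Int) (out : List Int) : Decidable (Spec_point_of_change onsets out) := by unfold Spec_point_of_change; infer_instance

-- ===== CLAIM (what is proved, stated in full; the proofs are below) =====
def Claim_equal_point_of_change : Prop := ∀ (onsets : List Int), Dom_point_of_change onsets → Pre_point_of_change onsets → Spec_point_of_change onsets (point_of_change onsets)

-- ===== LEMMAS AND PROOFS =====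

-- the change points both programs compute: chg prev t i lists, for the suffix t of the input
-- starting at index i with previous element prev, every index k-1 where element k differs from
-- element k-1 (without the final len-1).
def chg : Int → List Int → Int → List Int
  | _, [], _ => []
  | prev, x :: t, i => if x ≠ prev then (i - 1) :: chg x t (i + 1) else chg x t (i + 1)

theorem lemA (t : List Int) : ∀ (full : List Int) (i : Nat) (prev : Int) (acc : List Int),
    i ≤ full.length → full.drop i = t →
    ((PySem.List.pyRange (i : Int) (full.length : Int) 1).foldl
      (fun (s : Int × List Int) idx =>
        let curr := PySem.List.pyGetD full idx 0
        (curr, if curr ≠ s.1 then s.2 ++ [idx - 1] else s.2)) (prev, acc)).2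
    = acc ++ chg prev t (i : Int) := by
  induction t with
  | nil =>
    intro full i prev acc hi hd
    have : full.length ≤ i := by
      have := List.drop_eq_nil_iff.mp hd
      omega
    have hi' : i = full.length := by omega
    subst hi'
    rw [PySem.List.pyRange_one_eq_nil (le_refl _)]
    simp [chg]
  | cons x t' ih =>
    intro full i prev acc hi hd
    have hlt : i < full.length := by
      by_contra h
      rw [List.drop_eq_nil_of_le (by omega)] at hd
      simp at hd
    have hget : full[i]? = some x := by
      have h0 : (full.drop i)[0]? = some x := by rw [hd]; rfl
      rwa [List.getElem?_drop, Nat.add_zero] at h0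
    have hd' : full.drop (i + 1) = t' := by
      have : (full.drop i).drop 1 = t' := by rw [hd]; rfl
      rwa [List.drop_drop] at this
    rw [PySem.List.pyRange_one_cons (by exact_mod_cast hlt)]
    simp only [List.foldl_cons]
    have hcurr : PySem.List.pyGetD full (i : Int) 0 = x := by
      rw [PySem.List.pyGetD_natCast]
      simp [List.getD, hget]
    rw [hcurr]
    have hcast : ((i : Int) + 1) = ((i + 1 : Nat) : Int) := by push_cast; ring
    rw [hcast]
    rw [ih full (i + 1) x _ (by omega) hd']
    simp only [chg]
    split_ifs with h
    · simp
    · rfl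

theorem A_char (h : Int) (t : List Int) :
    point_of_change (h :: t) = chg h t 1 ++ [((h :: t).length : Int) - 1] := by
  have hprev : PySem.List.pyGetD (h :: t) 0 0 = h := by
    rw [show (0 : Int) = ((0 : Nat) : Int) by rfl, PySem.List.pyGetD_natCast]
    rfl
  have hfold := lemA t (h :: t) 1 h [] (by simp) (by rfl)
  simp only [Nat.cast_one, List.nil_append] at hfold
  unfold point_of_change
  simp only [hprev]
  exact congrArg (fun l => l ++ [((h :: t).length : Int) - 1]) hfold

theorem lemScan (t : List Int) : ∀ (full : List Int) (i : Nat) (v : Int),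
    i ≤ full.length → full.drop i = t →
    (pocScan full v i = full.length ∧ chg v t (i : Int) = []) ∨
    (pocScan full v i < full.length ∧
      chg v t (i : Int) = ((pocScan full v i : Int) - 1) ::
        chg (full.getD (pocScan full v i) 0) (full.drop (pocScan full v i + 1))
          ((pocScan full v i : Int) + 1)) := by
  induction t with
  | nil =>
    intro full i v hi hd
    have : full.length ≤ i := by
      have := List.drop_eq_nil_iff.mp hd
      omega
    have hi' : i = full.length := by omega
    left
    constructor
    · rw [pocScan]
      split
      · omega
      · exact hi'
    · simp [chg]
  | cons x t' ih =>
    intro full i v hi hd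
    have hlt : i < full.length := by
      by_contra h
      rw [List.drop_eq_nil_of_le (by omega)] at hd
      simp at hd
    have hget : full[i]? = some x := by
      have h0 : (full.drop i)[0]? = some x := by rw [hd]; rfl
      rwa [List.getElem?_drop, Nat.add_zero] at h0
    have hgetD : full.getD i 0 = x := by simp [List.getD, hget]
    have hd' : full.drop (i + 1) = t' := by
      have : (full.drop i).drop 1 = t' := by rw [hd]; rfl
      rwa [List.drop_drop] at this
    by_cases hv : x = v
    · -- run continues: pocScan steps to i+1, chg skips
      have hstep : pocScan full v i = pocScan full v (i + 1) := by
        rw [pocScan]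
        split
        · rfl
        · next hc => exact absurd ⟨hlt, by rw [hgetD, hv]⟩ hc
      have := ih full (i + 1) v (by omega) hd'
      have hcast : ((i : Int) + 1) = ((i + 1 : Nat) : Int) := by push_cast; ring
      rcases this with ⟨h1, h2⟩ | ⟨h1, h2⟩
      · left
        refine ⟨by rw [hstep]; exact h1, ?_⟩
        simp only [chg, hv]
        rw [if_neg (by simp), hcast, h2]
      · right
        refine ⟨by rw [hstep]; exact h1, ?_⟩
        simp only [chg, hv]
        rw [if_neg (by simp), hcast, h2, hstep]
    · -- run ends here: pocScan returns i
      have hstop : pocScan full v i = i := by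
        rw [pocScan]
        split
        · next hc => exact absurd hc.2 (by rw [hgetD]; exact hv)
        · rfl
      right
      refine ⟨by rw [hstop]; exact hlt, ?_⟩
      simp only [chg]
      rw [if_pos hv, hstop, hgetD, hd']

theorem lemB : ∀ (n : Nat) (full : List Int) (i : Nat) (acc : List Int),
    full.length - i ≤ n → i < full.length →
    pocOuter full i acc
      = acc ++ chg (full.getD i 0) (full.drop (i + 1)) ((i : Int) + 1)
            ++ [(full.length : Int) - 1] := by
  intro n
  induction n with
  | zero => intro full i acc hn hi; omega
  | succ n ih =>
    intro full i acc hn hi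
    rw [pocOuter]
    rw [dif_pos hi]
    have hge := pocScan_ge full (full.getD i 0) (i + 1)
    have hcast : ((i : Int) + 1) = ((i + 1 : Nat) : Int) := by push_cast; ring
    rcases lemScan (full.drop (i + 1)) full (i + 1) (full.getD i 0) (by omega) rfl with
      ⟨h1, h2⟩ | ⟨h1, h2⟩
    · -- scan ran to the end: recursive call returns acc immediately
      rw [hcast, h2]
      rw [pocOuter, dif_neg (by omega)]
      rw [h1]
      simp
    · -- scan stopped at j < length
      rw [ih full (pocScan full (full.getD i 0) (i + 1)) _ (by omega) h1]
      rw [hcast, h2]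
      simp
-- ===== VERDICT (by name: the statement is the Claim_ definition above) =====
theorem point_of_change_spec : Claim_equal_point_of_change := by
  unfold Claim_equal_point_of_change
  intro onsets _ hpre
  unfold Spec_point_of_change
  match onsets, hpre with
  | h :: t, _ =>
    rw [A_char]
    unfold point_of_change_alt
    rw [lemB ((h :: t).length) (h :: t) 0 [] (by omega) (by simp)]
    simp
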